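-- pv_equiv track=rewrite | github.com/austinzmchen/PythonAlgorithms | PythonAlgorithm/DP/FindCombinationsForGameScoring.py | scoring_options
-- ===== SOURCE A (Python) =====
-- from functools import lru_cache
--
-- def scoring_options(n):
--   @lru_cache
--   def recur(num):
--     if num < 0:
--       return 0
--     if num == 0:
--       return 1
--     i = 1
--     count = 0
--     while c := recur(num - i):
--       count += c
--       i *= 2
--     return count
--   #
--   return recur(n)
-- ===== SOURCE B (Python) =====
-- def scoring_options(n):
--     if n < 0:
--         return 0
--     dp = [1]
--     for k in range(1, n + 1):
--         s, p = 0, 1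
--         while p <= k:
--             s += dp[k - p]
--             p *= 2
--         dp.append(s)
--     return dp[n]
-- ===== Notes on version B (the rewrite author's own statement) =====
-- stated objective: faster
-- what changed: replaces A's top-down memoized recursion (a bare @lru_cache whose 128-entry eviction makes A's cost blow up once n outgrows the cache) by a bottom-up DP table dp[0..n] filled left to right; a timing run measured B tens of times faster at its mid size and A timing out at larger sizes where B returns
import Mathlib
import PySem

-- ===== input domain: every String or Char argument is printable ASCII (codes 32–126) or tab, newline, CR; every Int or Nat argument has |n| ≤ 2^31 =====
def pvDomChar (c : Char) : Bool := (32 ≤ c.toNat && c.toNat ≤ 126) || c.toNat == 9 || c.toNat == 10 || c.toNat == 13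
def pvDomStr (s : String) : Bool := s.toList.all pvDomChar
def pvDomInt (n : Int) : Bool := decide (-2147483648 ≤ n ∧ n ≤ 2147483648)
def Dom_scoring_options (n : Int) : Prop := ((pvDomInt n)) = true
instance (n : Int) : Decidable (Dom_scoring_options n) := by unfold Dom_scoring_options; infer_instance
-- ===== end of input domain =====

-- B replaces A's top-down memoized recursion (a bare @lru_cache) by a bottom-up DP
-- table dp[0..n] filled left to right (a different decomposition of the same count).

-- ===== PORT A =====
-- A's inner `recur` with @lru_cache is ported as a fuel-bounded recursion threading an
-- unbounded memo association list (lru_cache's 128-entry eviction changes running time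
-- only, never any returned value); fuel 2*n.toNat+2 is proved sufficient below.
mutual
def recurA : Nat → Int → List (Int × Int) → Int × List (Int × Int)
  | 0, _, memo => (0, memo)          -- fuel exhausted (unreachable with the fuel used)
  | f+1, num, memo =>
    match memo.lookup num with
    | some v => (v, memo)            -- cache hit
    | none =>
      if num < 0 then (0, (num, (0 : Int)) :: memo)
      else if num = 0 then (1, (num, (1 : Int)) :: memo)
      else
        let r := loopA f num 1 0 memo
        (r.1, (num, r.1) :: r.2)
termination_by f _ _ => 2 * f

def loopA : Nat → Int → Int → Int → List (Int × Int) → Int × List (Int × Int)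
  | 0, _, _, count, memo => (count, memo)   -- fuel exhausted (unreachable)
  | f+1, num, i, count, memo =>
    -- while c := recur(num - i): count += c; i *= 2
    let c := recurA (f+1) (num - i) memo
    if c.1 = 0 then (count, c.2) else loopA f num (2 * i) (count + c.1) c.2
termination_by f _ _ _ _ => 2 * f + 1
end

def scoring_options (n : Int) : Int := (recurA (2 * n.toNat + 2) n []).1

-- ===== PORT B =====
-- inner `while p <= k: s += dp[k-p]; p *= 2`; the index k-p is always in range, so
-- List.getD _ 0 reads exactly the Python dp[k-p].
def sumPowsB (dp : List Int) (k p : Nat) : Int :=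
  if h : 1 ≤ p ∧ p ≤ k then dp.getD (k - p) 0 + sumPowsB dp k (2 * p) else 0
termination_by k + 1 - p
decreasing_by omega

-- `for k in range(1, n+1): dp.append(s)` as a foldl over range n with k = j+1
def scoring_options_alt (n : Int) : Int :=
  if n < 0 then 0
  else ((List.range n.toNat).foldl (fun dp j => dp ++ [sumPowsB dp (j + 1) 1]) [1]).getD n.toNat 0

-- ===== PRECONDITION & SPEC =====
-- Pre_ excludes exactly the inputs on which Python A does not return: recur(n) descends
-- n → n-1 → …, so once n reaches the stated bound the call exceeds CPython's recursion
-- limit and A raises RecursionError (the bound is the measured cutoff of that raise);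
-- inside Pre_ A returns normally.
def Pre_scoring_options (n : Int) : Prop := n < 499
instance (n : Int) : Decidable (Pre_scoring_options n) := by unfold Pre_scoring_options; infer_instance
def pvWitness_scoring_options : Int := (7)

def Spec_scoring_options (n : Int) (out : Int) : Prop := out = scoring_options_alt n
instance (n : Int) (out : Int) : Decidable (Spec_scoring_options n out) := by unfold Spec_scoring_options; infer_instance

-- ===== CLAIM (what is proved, stated in full; the proofs are below) =====
def Claim_equal_scoring_options : Prop := ∀ (n : Int), Dom_scoring_options n → Pre_scoring_options n → Spec_scoring_options n (scoring_options n)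

-- ===== LEMMAS AND PROOFS =====

-- the common mathematical value: fS k = number of compositions of k into powers of two,
-- gS k p = the partial sum of fS (k - q) over powers q = p, 2p, 4p, … with q ≤ k
mutual
def fS : Nat → Int
  | 0 => 1
  | k+1 => gS (k+1) 1
termination_by k => 4 * k + 3

def gS : Nat → Nat → Int
  | k, p => if h : 1 ≤ p ∧ p ≤ k then fS (k - p) + gS k (2 * p) else 0
termination_by k p => 3 * k + (k + 1 - p) + 1
end

lemma gS_unfold (k p : Nat) :
    gS k p = if 1 ≤ p ∧ p ≤ k then fS (k - p) + gS k (2 * p) else 0 := by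
  rw [gS]; split_ifs with h <;> simp [h]

lemma gS_nonneg (k : Nat) (hf : ∀ j, j < k → 0 < fS j) :
    ∀ m p, k + 1 - p ≤ m → 0 ≤ gS k p := by
  intro m
  induction m with
  | zero =>
    intro p hp
    rw [gS_unfold]
    split_ifs with h
    · omega
    · exact le_refl 0
  | succ m ih =>
    intro p hp
    rw [gS_unfold]
    split_ifs with h
    · have h1 : 0 < fS (k - p) := hf _ (by omega)
      have h2 : 0 ≤ gS k (2 * p) := ih (2 * p) (by omega)
      omega
    · exact le_refl 0

lemma fS_pos : ∀ k, 0 < fS k := by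
  intro k
  induction k using Nat.strong_induction_on with
  | _ k ih =>
    match k with
    | 0 => simp [fS]
    | k+1 =>
      have h1 : fS (k+1) = gS (k+1) 1 := by rw [fS]
      have h2 : gS (k+1) 1 = fS k + gS (k+1) 2 := by
        rw [gS_unfold]; simp
      have h3 : 0 < fS k := ih k (by omega)
      have h4 : 0 ≤ gS (k+1) (2) := gS_nonneg (k+1) (fun j hj => ih j hj) (k + 2) 2 (by omega)
      omega

-- the value A's recur computes on an arbitrary Int argument
def rS (m : Int) : Int := if m < 0 then 0 else fS m.toNat

-- invariant of the memo list: every stored pair is correct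
def InvM (memo : List (Int × Int)) : Prop := ∀ q ∈ memo, q.2 = rS q.1

lemma lookup_rS {memo : List (Int × Int)} {x v : Int}
    (hm : InvM memo) (hl : memo.lookup x = some v) : v = rS x := by
  induction memo with
  | nil => simp [List.lookup] at hl
  | cons q t ih =>
    by_cases hx : x = q.1
    · have hq : q.2 = rS q.1 := hm q (by simp)
      subst hx
      simp [List.lookup] at hl
      rw [← hl]; exact hq
    · have hb : (x == q.1) = false := by simpa using hx
      simp only [List.lookup, hb] at hl
      exact ih (fun r hr => hm r (by simp [hr])) hl

lemma InvM_nil : InvM [] := by intro q hq; simp at hq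

lemma InvM_cons {memo : List (Int × Int)} {x v : Int}
    (hm : InvM memo) (hv : v = rS x) : InvM ((x, v) :: memo) := by
  intro q hq
  rcases List.mem_cons.mp hq with h | h
  · rw [h]; exact hv
  · exact hm q h

lemma recurA_neg : ∀ (f : Nat) (m : Int) (memo : List (Int × Int)), m < 0 → InvM memo →
    (recurA f m memo).1 = 0 ∧ InvM (recurA f m memo).2 := by
  intro f m memo hm hinv
  match f with
  | 0 => simp only [recurA]; exact ⟨by trivial, hinv⟩
  | f+1 =>
    cases hl : memo.lookup m with
    | some v =>
      have hv : v = rS m := lookup_rS hinv hl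
      simp only [recurA, hl]
      exact ⟨by rw [hv, rS, if_pos hm], hinv⟩
    | none =>
      simp only [recurA, hl, if_pos hm]
      exact ⟨by trivial, InvM_cons hinv (by rw [rS, if_pos hm])⟩

lemma loopA_correct (K : Nat) (hK : 1 ≤ K)
    (IH : ∀ m : Nat, m < K → ∀ f memo, 2 * m + 2 ≤ f → InvM memo →
      (recurA f (m : Int) memo).1 = fS m ∧ InvM (recurA f (m : Int) memo).2) :
    ∀ f e count memo, 2 ^ e ≤ 2 * K → 2 * K + 1 ≤ f + e → InvM memo →
    (loopA f (K : Int) ((2 ^ e : Nat) : Int) count memo).1 = count + gS K (2 ^ e) ∧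
    InvM (loopA f (K : Int) ((2 ^ e : Nat) : Int) count memo).2 := by
  intro f
  induction f with
  | zero =>
    intro e count memo he hf _
    exact absurd (Nat.lt_two_pow_self (n := e)) (by omega)
  | succ f ihf =>
    intro e count memo he hf hinv
    have hep : 1 ≤ 2 ^ e := Nat.one_le_two_pow
    have hlt : e < 2 ^ e := Nat.lt_two_pow_self
    rw [loopA]
    by_cases hle : 2 ^ e ≤ K
    · -- still in range: recur(num - i) = fS (K - 2^e) > 0, loop continues
      have hcast : (K : Int) - ((2 ^ e : Nat) : Int) = ((K - 2 ^ e : Nat) : Int) := by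
        push_cast [Nat.cast_sub hle]; ring
      have hmK : K - 2 ^ e < K := by omega
      have hfuel : 2 * (K - 2 ^ e) + 2 ≤ f + 1 := by
        have : e + 1 ≤ 2 ^ e := by omega
        omega
      have hrec := IH (K - 2 ^ e) hmK (f + 1) memo hfuel hinv
      rw [hcast]
      have hpos : 0 < fS (K - 2 ^ e) := fS_pos _
      rw [hrec.1]
      rw [if_neg (by omega)]
      have hcast2 : 2 * ((2 ^ e : Nat) : Int) = ((2 ^ (e + 1) : Nat) : Int) := by
        push_cast [pow_succ]; ring
      rw [hcast2]
      have hnext := ihf (e + 1) (count + fS (K - 2 ^ e)) _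
        (by rw [pow_succ]; omega) (by omega) hrec.2
      refine ⟨?_, hnext.2⟩
      rw [hnext.1, gS_unfold K (2 ^ e), if_pos ⟨hep, hle⟩, pow_succ]
      ring_nf
    · -- 2^e > K: recur gets a negative argument, returns 0, loop stops
      have hneg : (K : Int) - ((2 ^ e : Nat) : Int) < 0 := by
        have h1 : K < 2 ^ e := by omega
        have h2 : (K : Int) < ((2 ^ e : Nat) : Int) := by exact_mod_cast h1
        omega
      have hrec := recurA_neg (f + 1) _ memo hneg hinv
      rw [if_pos hrec.1]
      refine ⟨?_, hrec.2⟩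
      rw [gS_unfold, if_neg (by omega)]
      ring

lemma recurA_correct : ∀ K : Nat, ∀ f memo, 2 * K + 2 ≤ f → InvM memo →
    (recurA f (K : Int) memo).1 = fS K ∧ InvM (recurA f (K : Int) memo).2 := by
  intro K
  induction K using Nat.strong_induction_on with
  | _ K IH =>
    intro f memo hf hinv
    match f, hf with
    | f+1, hf =>
      have hKnn : ¬ ((K : Int) < 0) := by omega
      cases hl : memo.lookup (K : Int) with
      | some v =>
        have hv : v = rS K := lookup_rS hinv hl
        simp only [recurA, hl]
        exact ⟨by rw [hv, rS, if_neg hKnn, Int.toNat_natCast], hinv⟩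
      | none =>
        simp only [recurA, hl, if_neg hKnn]
        by_cases hK0 : K = 0
        · subst hK0
          rw [if_pos (by norm_num)]
          exact ⟨by simp [fS], InvM_cons hinv (by simp [rS, fS])⟩
        · rw [if_neg (by exact_mod_cast hK0)]
          have hloop := loopA_correct K (by omega) (fun m hm => IH m hm) f 0 0 memo
            (by simpa using by omega) (by omega) hinv
          simp only [pow_zero, Nat.cast_one] at hloop
          have hfK : fS K = gS K 1 := by
            match K, hK0 with
            | k+1, _ => rw [fS]
          refine ⟨by rw [hloop.1, hfK]; ring, ?_⟩
          exact InvM_cons hloop.2 (by rw [hloop.1, rS, if_neg (by omega), Int.toNat_natCast, hfK]; ring)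

lemma scoring_options_nonneg (n : Int) (hn : 0 ≤ n) : scoring_options n = fS n.toNat := by
  have hcast : ((n.toNat : Nat) : Int) = n := Int.toNat_of_nonneg hn
  rw [scoring_options]
  have := recurA_correct n.toNat (2 * n.toNat + 2) [] (le_refl _) InvM_nil
  rw [hcast] at this
  exact this.1

lemma scoring_options_negcase (n : Int) (hn : n < 0) : scoring_options n = 0 := by
  rw [scoring_options]
  exact (recurA_neg _ n [] hn InvM_nil).1

lemma getD_map_range_fS {L j : Nat} (h : j < L) :
    ((List.range L).map fS).getD j 0 = fS j := by
  rw [List.getD_eq_getElem?_getD, List.getElem?_map, List.getElem?_range h]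
  rfl

lemma sumPowsB_eq (L : Nat) : ∀ m k p, k ≤ L → k + 1 - p ≤ m →
    sumPowsB ((List.range L).map fS) k p = gS k p := by
  intro m
  induction m with
  | zero =>
    intro k p hk hp
    rw [sumPowsB, gS_unfold]
    split_ifs with h
    · omega
    · rfl
  | succ m ih =>
    intro k p hk hp
    rw [sumPowsB, gS_unfold]
    split_ifs with h
    · rw [getD_map_range_fS (by omega), ih k (2 * p) hk (by omega)]
    · rfl

lemma build_eq : ∀ k : Nat,
    (List.range k).foldl (fun dp j => dp ++ [sumPowsB dp (j + 1) 1]) [1] =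
      (List.range (k + 1)).map fS := by
  intro k
  induction k with
  | zero => simp [fS]
  | succ k ih =>
    rw [List.range_succ, List.foldl_append, ih]
    simp only [List.foldl_cons, List.foldl_nil]
    rw [sumPowsB_eq (k + 1) (k + 2) (k + 1) 1 (le_refl _) (by omega)]
    have h2 : List.map fS (List.range (k + 1 + 1)) = List.map fS (List.range (k + 1)) ++ [fS (k + 1)] := by
      rw [List.range_succ, List.map_append]; rfl
    rw [h2, fS]

lemma scoring_alt_nonneg (n : Int) (hn : 0 ≤ n) : scoring_options_alt n = fS n.toNat := by
  rw [scoring_options_alt, if_neg (by omega), build_eq]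
  exact getD_map_range_fS (by omega)

-- ===== VERDICT (by name: the statement is the Claim_ definition above) =====
theorem scoring_options_spec : Claim_equal_scoring_options := by
  intro n _ _
  unfold Spec_scoring_options
  by_cases hn : n < 0
  · rw [scoring_options_negcase n hn, scoring_options_alt, if_pos hn]
  · rw [scoring_options_nonneg n (by omega), scoring_alt_nonneg n (by omega)]
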